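-- pv_equiv track=rewrite | github.com/honu-shell-utions/python | sandbox/project_euler/601-650/612_friend_numbers02.py | F
-- ===== SOURCE A (Python) =====
-- from math import factorial
--
-- def F(a, b):
--     assert a >= 0 and b >= 0
--     if a < b or a == 0:
--         return 0
--     if b == 0:
--         return 10 ** a
--     if a == b:
--         return factorial(a)
--     return (10 - b) * F(a - 1, b) + b * F(a - 1, b - 1)
-- ===== SOURCE B (Python) =====
-- def F(a, b):
--     assert a >= 0 and b >= 0
--     if a < b or a == 0:
--         return 0
--     if b == 0:
--         return 10 ** a
--     # bottom-up DP: prev[j] holds row i of the recurrence, seeded with row 0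
--     prev = [1] + [0] * b
--     for _ in range(a):
--         prev = [10 * prev[0]] + [(10 - j) * prev[j] + j * prev[j - 1]
--                                  for j in range(1, b + 1)]
--     return prev[b]
-- ===== Notes on version B (the rewrite author's own statement) =====
-- stated objective: faster
-- what changed: replaced the exponential two-branch recursion with a bottom-up DP that builds each row of the recurrence iteratively
import Mathlib
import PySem

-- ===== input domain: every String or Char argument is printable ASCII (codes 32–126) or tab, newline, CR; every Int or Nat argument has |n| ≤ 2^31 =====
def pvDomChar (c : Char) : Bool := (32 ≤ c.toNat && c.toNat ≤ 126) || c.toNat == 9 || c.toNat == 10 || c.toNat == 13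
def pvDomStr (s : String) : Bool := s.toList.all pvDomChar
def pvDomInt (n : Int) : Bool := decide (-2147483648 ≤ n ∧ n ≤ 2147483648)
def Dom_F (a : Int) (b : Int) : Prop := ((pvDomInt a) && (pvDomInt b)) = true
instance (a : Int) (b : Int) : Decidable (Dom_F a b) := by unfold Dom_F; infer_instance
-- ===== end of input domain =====

-- B replaces A's exponential two-branch recursion by a bottom-up O(a*b) row DP (asymptotically faster).

-- ===== PORT A =====
-- the outer 'if a < 0 ∨ b < 0' guard totalises the port: Python's assert raises there (outside Pre_F)
def F (a : Int) (b : Int) : Int :=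
  if a < 0 ∨ b < 0 then 0
  else if a < b ∨ a = 0 then 0
  else if b = 0 then 10 ^ a.toNat
  else if a = b then (Nat.factorial a.toNat : Int)
  else (10 - b) * F (a - 1) b + b * F (a - 1) (b - 1)
termination_by a.toNat
decreasing_by
  all_goals
    rename_i h0 h1 _ _
    omega

-- ===== PORT B =====
-- totalising guard as in F; then the literal row DP of Source B over a list
def F_alt (a : Int) (b : Int) : Int :=
  if a < 0 ∨ b < 0 then 0
  else if a < b ∨ a = 0 then 0
  else if b = 0 then 10 ^ a.toNat
  else
    ((List.range a.toNat).foldl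
      (fun prev _ =>
        (10 * prev.headD 0) ::
          (List.range b.toNat).map (fun (j0 : Nat) =>
            (10 - ((j0 : Int) + 1)) * prev.getD (j0 + 1) 0 +
              ((j0 : Int) + 1) * prev.getD j0 0))
      ((1 : Int) :: List.replicate b.toNat 0)).getD b.toNat 0

-- ===== PRECONDITION & SPEC =====
-- Pre_F: exactly the inputs on which the Python assert passes (A raises AssertionError otherwise)
def Pre_F (a : Int) (b : Int) : Prop := 0 ≤ a ∧ 0 ≤ b
instance (a : Int) (b : Int) : Decidable (Pre_F a b) := by unfold Pre_F; infer_instance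
def pvWitness_F : Int × Int := (7, 3)

def Spec_F (a : Int) (b : Int) (out : Int) : Prop := out = F_alt a b
instance (a : Int) (b : Int) (out : Int) : Decidable (Spec_F a b out) := by unfold Spec_F; infer_instance

-- ===== CLAIM (what is proved, stated in full; the proofs are below) =====
def Claim_equal_F : Prop := ∀ (a : Int) (b : Int), Dom_F a b → Pre_F a b → Spec_F a b (F a b)

-- ===== LEMMAS AND PROOFS =====

-- mathematical value of the recurrence on Nat indices (proof-only helper)
def g : Nat → Nat → Int
  | 0, 0 => 1
  | 0, _ + 1 => 0
  | i + 1, 0 => 10 * g i 0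
  | i + 1, j + 1 => (10 - ((j : Int) + 1)) * g i (j + 1) + ((j : Int) + 1) * g i j

theorem g_zero (i : Nat) : g i 0 = 10 ^ i := by
  induction i with
  | zero => simp [g]
  | succ i ih => simp [g, ih]; ring

theorem g_gt (i j : Nat) (h : i < j) : g i j = 0 := by
  induction i generalizing j with
  | zero => cases j with | zero => omega | succ j => simp [g]
  | succ i ih =>
    cases j with
    | zero => omega
    | succ j =>
      have h1 : i < j := by omega
      rw [g, ih _ h1, ih _ (by omega)]; ring

theorem g_diag (i : Nat) : g i i = (Nat.factorial i : Int) := by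
  induction i with
  | zero => simp [g, Nat.factorial]
  | succ i ih =>
    rw [g, g_gt i (i + 1) (by omega), ih, Nat.factorial]
    push_cast; ring

theorem F_zero (i : Nat) (hi : 1 ≤ i) : F (i : Int) 0 = 10 ^ i := by
  rw [F]
  have h1 : ¬((i : Int) < 0 ∨ (0 : Int) < 0) := by omega
  have h2 : ¬((i : Int) < 0 ∨ (i : Int) = 0) := by omega
  rw [if_neg h1, if_neg h2, if_pos rfl]
  simp

-- A's port equals g on 1 ≤ i, j ≤ i
theorem F_eq_g (i j : Nat) (hi : 1 ≤ i) (hij : j ≤ i) :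
    F (i : Int) (j : Int) = g i j := by
  induction i generalizing j with
  | zero => omega
  | succ i ih =>
    cases j with
    | zero =>
      rw [g_zero]
      simpa using F_zero (i + 1) (by omega)
    | succ j =>
      rw [F]
      have c1 : ¬(((i + 1 : Nat) : Int) < 0 ∨ ((j + 1 : Nat) : Int) < 0) := by
        push_cast; omega
      have c2 : ¬(((i + 1 : Nat) : Int) < ((j + 1 : Nat) : Int) ∨ ((i + 1 : Nat) : Int) = 0) := by
        push_cast; omega
      have c3 : ((j + 1 : Nat) : Int) ≠ 0 := by push_cast; omega
      rw [if_neg c1, if_neg c2, if_neg c3]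
      by_cases hd : ((i + 1 : Nat) : Int) = ((j + 1 : Nat) : Int)
      · rw [if_pos hd]
        have hji : j = i := by push_cast at hd; omega
        subst hji
        rw [show (((j + 1 : Nat) : Int)).toNat = j + 1 by simp, g_diag]
      · rw [if_neg hd]
        have hji : j + 1 ≤ i := by push_cast at hd hij; omega
        have hi1 : 1 ≤ i := by omega
        have e1 : ((i + 1 : Nat) : Int) - 1 = ((i : Nat) : Int) := by push_cast; ring
        have e2 : ((j + 1 : Nat) : Int) - 1 = ((j : Nat) : Int) := by push_cast; ring
        rw [e1, e2, ih (j + 1) hi1 hji]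
        have h2 : F (i : Int) (j : Int) = g i j := by
          cases Nat.eq_zero_or_pos j with
          | inl h0 =>
            subst h0
            rw [g_zero]
            simpa using F_zero i hi1
          | inr h1 => exact ih j hi1 (by omega)
        rw [h2, g]
        push_cast; ring

-- the DP row after k steps is the k-th row of g
theorem row_inv (b k : Nat) :
    (List.range k).foldl
      (fun prev _ =>
        (10 * prev.headD 0) ::
          (List.range b).map (fun (j0 : Nat) =>
            (10 - ((j0 : Int) + 1)) * prev.getD (j0 + 1) 0 +
              ((j0 : Int) + 1) * prev.getD j0 0))
      ((1 : Int) :: List.replicate b 0)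
    = (List.range (b + 1)).map (fun j => g k j) := by
  induction k with
  | zero =>
    simp only [List.range_zero, List.foldl_nil]
    apply List.ext_getElem
    · simp
    · intro n h1 h2
      simp only [List.getElem_map, List.getElem_range]
      cases n with
      | zero => simp [g]
      | succ n =>
        simp at h1
        rw [List.getElem_cons_succ, List.getElem_replicate, g_gt 0 (n + 1) (by omega)]
  | succ k ih =>
    rw [List.range_succ, List.foldl_append, ih]
    simp only [List.foldl_cons, List.foldl_nil]
    apply List.ext_getElem
    · simp
    · intro n h1 h2
      simp only [List.getElem_map, List.getElem_range]
      have hget : ∀ m, m < b + 1 →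
          ((List.range (b + 1)).map (fun j => g k j)).getD m 0 = g k m := by
        intro m hm
        rw [List.getD_eq_getElem _ _ (by simp [hm])]
        simp
      cases n with
      | zero =>
        have hh : ((List.range (b + 1)).map (fun j => g k j)).headD 0 = g k 0 := by
          rw [List.range_succ_eq_map]; simp
        simp only [List.getElem_cons_zero, hh, g]
      | succ n =>
        simp at h1
        rw [List.getElem_cons_succ, List.getElem_map, List.getElem_range]
        rw [hget (n + 1) (by omega), hget n (by omega), g]

-- B's port equals g on 1 ≤ j ≤ i
theorem F_alt_eq_g (i j : Nat) (hj : 1 ≤ j) (hij : j ≤ i) :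
    F_alt (i : Int) (j : Int) = g i j := by
  rw [F_alt]
  have c1 : ¬((i : Int) < 0 ∨ (j : Int) < 0) := by omega
  have c2 : ¬((i : Int) < (j : Int) ∨ (i : Int) = 0) := by omega
  have c3 : (j : Int) ≠ 0 := by omega
  rw [if_neg c1, if_neg c2, if_neg c3]
  simp only [Int.toNat_natCast]
  rw [row_inv j i, List.getD_eq_getElem _ _ (by simp)]
  simp

-- ===== VERDICT (by name: the statement is the Claim_ definition above) =====
theorem F_spec : Claim_equal_F := by
  intro a b _ hpre
  unfold Spec_F
  obtain ⟨ha, hb⟩ := hpre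
  obtain ⟨i, rfl⟩ := Int.eq_ofNat_of_zero_le ha
  obtain ⟨j, rfl⟩ := Int.eq_ofNat_of_zero_le hb
  have h0 : ¬((i : Int) < 0 ∨ (j : Int) < 0) := by omega
  by_cases hz : (i : Int) < (j : Int) ∨ (i : Int) = 0
  · have hF : F (i : Int) (j : Int) = 0 := by rw [F, if_neg h0, if_pos hz]
    have hB : F_alt (i : Int) (j : Int) = 0 := by rw [F_alt, if_neg h0, if_pos hz]
    rw [hF, hB]
  · by_cases hb0 : (j : Int) = 0
    · have hF : F (i : Int) (j : Int) = 10 ^ ((i : Int)).toNat := by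
        rw [F, if_neg h0, if_neg hz, if_pos hb0]
      have hB : F_alt (i : Int) (j : Int) = 10 ^ ((i : Int)).toNat := by
        rw [F_alt, if_neg h0, if_neg hz, if_pos hb0]
      rw [hF, hB]
    · have hj : 1 ≤ j := by
        by_contra h
        exact hb0 (by omega)
      have hij : j ≤ i := by omega
      rw [F_alt_eq_g i j hj hij, F_eq_g i j (by omega) hij]
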